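-- pv_equiv track=rewrite | github.com/pypi-data/pypi-mirror-333 | packages/apknife/apknife-1.2.0-py3-none-any.whl/apknife/modules/permission_scanner.py | classify_permissions
-- ===== SOURCE A (Python) =====
-- PERMISSION_CATEGORIES = {
--     "normal": {
--         "android.permission.ACCESS_WIFI_STATE": "Allows applications to access Wi-Fi networks.",
--         "android.permission.ACCESS_NETWORK_STATE": "Allows applications to access networks.",
--         "android.permission.SET_WALLPAPER": "Allows setting the wallpaper.",
--         "android.permission.CHANGE_WIFI_STATE": "Allows changing Wi-Fi state.",
--     },
--     "dangerous": {
--         "android.permission.ACCESS_FINE_LOCATION": "Precise location access using GPS.",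
--         "android.permission.ACCESS_COARSE_LOCATION": "Approximate location access using network sources.",
--         "android.permission.CALL_PHONE": "Initiate a phone call without user interaction.",
--         "android.permission.READ_CONTACTS": "Read user contacts data.",
--         "android.permission.WRITE_CONTACTS": "Write user contacts data.",
--         "android.permission.RECORD_AUDIO": "Record audio using the microphone.",
--         "android.permission.CAMERA": "Access the camera for photos and videos.",
--         "android.permission.READ_SMS": "Read SMS messages.",
--         "android.permission.SEND_SMS": "Send SMS messages.",
--         "android.permission.RECEIVE_SMS": "Receive SMS messages.",
--         "android.permission.READ_CALL_LOG": "Read the user's call log.",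
--         "android.permission.WRITE_CALL_LOG": "Modify the user's call log.",
--         "android.permission.READ_PHONE_STATE": "Read phone state information.",
--     },
--     "critical": {
--         "android.permission.WRITE_SETTINGS": "Modify system settings, which can be dangerous.",
--         "android.permission.REQUEST_IGNORE_BATTERY_OPTIMIZATIONS": "Ignore battery optimizations, potentially draining battery.",
--         "android.permission.RECEIVE_BOOT_COMPLETED": "Start after boot, potentially for persistent background execution.",
--         "android.permission.INTERNET": "Access the internet, often used for external communication.",
--         "android.permission.WRITE_EXTERNAL_STORAGE": "Write to external storage, potentially exposing user data.",
--     },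
-- }
--
-- def classify_permissions(permissions):
--     """Classifies permissions into normal, dangerous, critical, and unknown."""
--     categorized = {"normal": [], "dangerous": [], "critical": [], "unknown": []}
--
--     for perm in permissions:
--         found = False
--         for category, perms in PERMISSION_CATEGORIES.items():
--             if perm in perms:
--                 categorized[category].append(
--                     (perm, perms[perm])
--                 )  # Store with description
--                 found = True
--                 break
--         if not found:
--             categorized["unknown"].append(
--                 (perm, "Unknown permission - may require further analysis.")
--             )
--
--     return categorized
-- ===== SOURCE B (Python) =====
-- PERMISSION_CATEGORIES = {
--     "normal": {
--         "android.permission.ACCESS_WIFI_STATE": "Allows applications to access Wi-Fi networks.",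
--         "android.permission.ACCESS_NETWORK_STATE": "Allows applications to access networks.",
--         "android.permission.SET_WALLPAPER": "Allows setting the wallpaper.",
--         "android.permission.CHANGE_WIFI_STATE": "Allows changing Wi-Fi state.",
--     },
--     "dangerous": {
--         "android.permission.ACCESS_FINE_LOCATION": "Precise location access using GPS.",
--         "android.permission.ACCESS_COARSE_LOCATION": "Approximate location access using network sources.",
--         "android.permission.CALL_PHONE": "Initiate a phone call without user interaction.",
--         "android.permission.READ_CONTACTS": "Read user contacts data.",
--         "android.permission.WRITE_CONTACTS": "Write user contacts data.",
--         "android.permission.RECORD_AUDIO": "Record audio using the microphone.",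
--         "android.permission.CAMERA": "Access the camera for photos and videos.",
--         "android.permission.READ_SMS": "Read SMS messages.",
--         "android.permission.SEND_SMS": "Send SMS messages.",
--         "android.permission.RECEIVE_SMS": "Receive SMS messages.",
--         "android.permission.READ_CALL_LOG": "Read the user's call log.",
--         "android.permission.WRITE_CALL_LOG": "Modify the user's call log.",
--         "android.permission.READ_PHONE_STATE": "Read phone state information.",
--     },
--     "critical": {
--         "android.permission.WRITE_SETTINGS": "Modify system settings, which can be dangerous.",
--         "android.permission.REQUEST_IGNORE_BATTERY_OPTIMIZATIONS": "Ignore battery optimizations, potentially draining battery.",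
--         "android.permission.RECEIVE_BOOT_COMPLETED": "Start after boot, potentially for persistent background execution.",
--         "android.permission.INTERNET": "Access the internet, often used for external communication.",
--         "android.permission.WRITE_EXTERNAL_STORAGE": "Write to external storage, potentially exposing user data.",
--     },
-- }
--
-- _UNKNOWN = ("unknown", "Unknown permission - may require further analysis.")
--
-- # Flat reverse-lookup map built once: permission -> (category, description).
-- _FLAT = {
--     perm: (category, desc)
--     for category, perms in PERMISSION_CATEGORIES.items()
--     for perm, desc in perms.items()
-- }
--
--
-- def classify_permissions(permissions):
--     """Classifies permissions into normal, dangerous, critical, and unknown."""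
--     categorized = {"normal": [], "dangerous": [], "critical": [], "unknown": []}
--     for perm in permissions:
--         category, desc = _FLAT.get(perm, _UNKNOWN)
--         categorized[category].append((perm, desc))
--     return categorized
-- ===== Notes on version B (the rewrite author's own statement) =====
-- stated objective: simpler
-- what changed: Replaces the nested loop (per permission, scan the three category dicts with a found-flag and break) by a flat reverse-lookup dict perm -> (category, description) built once, so the classification is a single pass with one dict lookup per permission and no inner loop or flag.
import Mathlib
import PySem

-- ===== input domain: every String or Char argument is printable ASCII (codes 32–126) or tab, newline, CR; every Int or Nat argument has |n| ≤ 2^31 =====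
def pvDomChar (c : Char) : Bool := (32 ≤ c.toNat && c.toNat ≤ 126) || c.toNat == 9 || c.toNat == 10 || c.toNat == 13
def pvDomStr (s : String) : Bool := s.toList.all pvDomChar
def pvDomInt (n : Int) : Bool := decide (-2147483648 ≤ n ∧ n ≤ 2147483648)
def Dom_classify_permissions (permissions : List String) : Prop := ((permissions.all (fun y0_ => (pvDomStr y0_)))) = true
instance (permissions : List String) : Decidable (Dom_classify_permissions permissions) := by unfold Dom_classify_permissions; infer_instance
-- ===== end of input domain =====

-- B replaces A's nested scan over the category buckets by a flat reverse-lookup dict built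
-- once (permission -> (category, description)) and one lookup per permission: simpler, no inner loop.

-- ===== PORT A =====
def PERMISSION_CATEGORIES : PySem.Dict String (PySem.Dict String String) :=
  PySem.Dict.mk [
    ("normal", PySem.Dict.mk [("android.permission.ACCESS_WIFI_STATE", "Allows applications to access Wi-Fi networks."), ("android.permission.ACCESS_NETWORK_STATE", "Allows applications to access networks."), ("android.permission.SET_WALLPAPER", "Allows setting the wallpaper."), ("android.permission.CHANGE_WIFI_STATE", "Allows changing Wi-Fi state.")]),
    ("dangerous", PySem.Dict.mk [("android.permission.ACCESS_FINE_LOCATION", "Precise location access using GPS."), ("android.permission.ACCESS_COARSE_LOCATION", "Approximate location access using network sources."), ("android.permission.CALL_PHONE", "Initiate a phone call without user interaction."), ("android.permission.READ_CONTACTS", "Read user contacts data."), ("android.permission.WRITE_CONTACTS", "Write user contacts data."), ("android.permission.RECORD_AUDIO", "Record audio using the microphone."), ("android.permission.CAMERA", "Access the camera for photos and videos."), ("android.permission.READ_SMS", "Read SMS messages."), ("android.permission.SEND_SMS", "Send SMS messages."), ("android.permission.RECEIVE_SMS", "Receive SMS messages."), ("android.permission.READ_CALL_LOG", "Read the user's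 call log."), ("android.permission.WRITE_CALL_LOG", "Modify the user's call log."), ("android.permission.READ_PHONE_STATE", "Read phone state information.")]),
    ("critical", PySem.Dict.mk [("android.permission.WRITE_SETTINGS", "Modify system settings, which can be dangerous."), ("android.permission.REQUEST_IGNORE_BATTERY_OPTIMIZATIONS", "Ignore battery optimizations, potentially draining battery."), ("android.permission.RECEIVE_BOOT_COMPLETED", "Start after boot, potentially for persistent background execution."), ("android.permission.INTERNET", "Access the internet, often used for external communication."), ("android.permission.WRITE_EXTERNAL_STORAGE", "Write to external storage, potentially exposing user data.")])]

-- the inner 'for category, perms in PERMISSION_CATEGORIES.items(): if perm in perms: … break'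
-- (the getD "" is only reached under the contains guard, where it is exactly perms[perm])
def innerLoopA (perm : String) (categorized : PySem.Dict String (List (String × String))) :
    List (String × PySem.Dict String String) → PySem.Dict String (List (String × String)) × Bool
  | [] => (categorized, false)
  | (category, perms) :: rest =>
    if perms.contains perm then
      (categorized.modify category [] (fun l => l ++ [(perm, perms.getD perm "")]), true)
    else innerLoopA perm categorized rest

def bodyA (categorized : PySem.Dict String (List (String × String))) (perm : String) :
    PySem.Dict String (List (String × String)) :=
  let r := innerLoopA perm categorized PERMISSION_CATEGORIES.items
  if r.2 then r.1
  else r.1.modify "unknown" [] (fun l => l ++ [(perm, "Unknown permission - may require further analysis.")])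

def classify_permissions (permissions : List String) : List (String × List (String × String)) :=
  (permissions.foldl bodyA
    (PySem.Dict.mk [("normal", []), ("dangerous", []), ("critical", []), ("unknown", [])])).items

-- ===== PORT B =====
def pvUNKNOWN : String × String := ("unknown", "Unknown permission - may require further analysis.")

-- the flat reverse-lookup map _FLAT, built once by the dict comprehension in Source B
def pvFLAT : PySem.Dict String (String × String) :=
  PERMISSION_CATEGORIES.items.foldl
    (fun f cp => cp.2.items.foldl (fun f pd => f.insert pd.1 (cp.1, pd.2)) f)
    PySem.Dict.empty

def bodyB (categorized : PySem.Dict String (List (String × String))) (perm : String) :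
    PySem.Dict String (List (String × String)) :=
  let cd := pvFLAT.getD perm pvUNKNOWN
  categorized.modify cd.1 [] (fun l => l ++ [(perm, cd.2)])

def classify_permissions_alt (permissions : List String) : List (String × List (String × String)) :=
  (permissions.foldl bodyB
    (PySem.Dict.mk [("normal", []), ("dangerous", []), ("critical", []), ("unknown", [])])).items

-- ===== PRECONDITION & SPEC =====
def Spec_classify_permissions (permissions : List String) (out : List (String × List (String × String))) : Prop := out = classify_permissions_alt permissions
instance (permissions : List String) (out : List (String × List (String × String))) : Decidable (Spec_classify_permissions permissions out) := by unfold Spec_classify_permissions; infer_instance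

-- ===== CLAIM (what is proved, stated in full; the proofs are below) =====
def Claim_equal_classify_permissions : Prop := ∀ (permissions : List String), Dom_classify_permissions permissions → Spec_classify_permissions permissions (classify_permissions permissions)

-- ===== LEMMAS AND PROOFS =====

set_option maxHeartbeats 1000000 in
lemma pvFLAT_eq : pvFLAT = PySem.Dict.mk (PERMISSION_CATEGORIES.items.flatMap (fun cp => cp.2.items.map (fun pd => (pd.1, (cp.1, pd.2))))) := by decide

-- the per-permission step of A (inner scan with found-flag) equals the per-permission step of B
-- (one lookup in the flat map): case split on which known permission perm is, if any
set_option maxHeartbeats 2000000 in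
lemma body_eq (categorized : PySem.Dict String (List (String × String))) (perm : String) :
    bodyA categorized perm = bodyB categorized perm := by
  by_cases h0 : "android.permission.ACCESS_WIFI_STATE" = perm
  · subst h0; rfl
  by_cases h1 : "android.permission.ACCESS_NETWORK_STATE" = perm
  · subst h1; rfl
  by_cases h2 : "android.permission.SET_WALLPAPER" = perm
  · subst h2; rfl
  by_cases h3 : "android.permission.CHANGE_WIFI_STATE" = perm
  · subst h3; rfl
  by_cases h4 : "android.permission.ACCESS_FINE_LOCATION" = perm
  · subst h4; rfl
  by_cases h5 : "android.permission.ACCESS_COARSE_LOCATION" = perm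
  · subst h5; rfl
  by_cases h6 : "android.permission.CALL_PHONE" = perm
  · subst h6; rfl
  by_cases h7 : "android.permission.READ_CONTACTS" = perm
  · subst h7; rfl
  by_cases h8 : "android.permission.WRITE_CONTACTS" = perm
  · subst h8; rfl
  by_cases h9 : "android.permission.RECORD_AUDIO" = perm
  · subst h9; rfl
  by_cases h10 : "android.permission.CAMERA" = perm
  · subst h10; rfl
  by_cases h11 : "android.permission.READ_SMS" = perm
  · subst h11; rfl
  by_cases h12 : "android.permission.SEND_SMS" = perm
  · subst h12; rfl
  by_cases h13 : "android.permission.RECEIVE_SMS" = perm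
  · subst h13; rfl
  by_cases h14 : "android.permission.READ_CALL_LOG" = perm
  · subst h14; rfl
  by_cases h15 : "android.permission.WRITE_CALL_LOG" = perm
  · subst h15; rfl
  by_cases h16 : "android.permission.READ_PHONE_STATE" = perm
  · subst h16; rfl
  by_cases h17 : "android.permission.WRITE_SETTINGS" = perm
  · subst h17; rfl
  by_cases h18 : "android.permission.REQUEST_IGNORE_BATTERY_OPTIMIZATIONS" = perm
  · subst h18; rfl
  by_cases h19 : "android.permission.RECEIVE_BOOT_COMPLETED" = perm
  · subst h19; rfl
  by_cases h20 : "android.permission.INTERNET" = perm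
  · subst h20; rfl
  by_cases h21 : "android.permission.WRITE_EXTERNAL_STORAGE" = perm
  · subst h21; rfl
  -- perm matches none of the 22 known permissions: both sides hit the unknown bucket
  simp [bodyA, bodyB, innerLoopA, PERMISSION_CATEGORIES, pvFLAT_eq, pvUNKNOWN,
    PySem.Dict.contains_mk, PySem.Dict.getD_eq_get?_getD, PySem.Dict.get?,
    h0, h1, h2, h3, h4, h5, h6, h7, h8, h9, h10, h11, h12, h13, h14, h15, h16, h17, h18, h19, h20, h21]

-- ===== VERDICT (by name: the statement is the Claim_ definition above) =====
theorem classify_permissions_spec : Claim_equal_classify_permissions := by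
  intro permissions _
  unfold Spec_classify_permissions classify_permissions classify_permissions_alt
  rw [show bodyA = bodyB from funext fun c => funext fun p => body_eq c p]
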